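-- pv_equiv track=rewrite | github.com/meuzishun/codewars | 3kyu/Alphabetic_Anagrams.py | calc_permutations
-- ===== SOURCE A (Python) =====
-- import math
--
-- def calc_permutations(dict):
--     count = 0
--     denominator = 1
--
--     for num in dict.values():
--         count += num
--         denominator *= math.factorial(num)
--
--     numerator = math.factorial(count)
--
--     return numerator // denominator
-- ===== SOURCE B (Python) =====
-- import math
--
-- def calc_permutations(dict):
--     result = 1
--     n = 0
--     for c in dict.values():
--         result *= math.comb(n + c, c)
--         n += c
--     return result
-- ===== Notes on version B (the rewrite author's own statement) =====
-- stated objective: alternative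
-- what changed: Computes the multinomial as a telescoping product of binomial coefficients (one math.comb per letter, maintaining a running total) instead of summing counts, multiplying factorials and dividing once at the end.
import Mathlib
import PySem

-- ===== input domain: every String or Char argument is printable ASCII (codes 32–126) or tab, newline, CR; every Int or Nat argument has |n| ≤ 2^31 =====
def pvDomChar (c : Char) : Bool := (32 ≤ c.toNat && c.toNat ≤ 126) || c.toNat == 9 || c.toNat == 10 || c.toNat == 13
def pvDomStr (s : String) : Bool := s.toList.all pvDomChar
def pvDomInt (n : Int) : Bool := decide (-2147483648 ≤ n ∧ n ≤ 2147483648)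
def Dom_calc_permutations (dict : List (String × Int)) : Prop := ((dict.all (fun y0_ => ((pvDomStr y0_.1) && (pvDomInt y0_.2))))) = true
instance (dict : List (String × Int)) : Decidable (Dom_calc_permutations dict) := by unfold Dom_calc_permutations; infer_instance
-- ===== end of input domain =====

-- B computes the multinomial as a telescoping product of binomial coefficients (one
-- Nat.choose per value, with a running total) instead of A's factorial product and
-- one final division; an alternative decomposition, not claimed faster.

-- ===== PORT A =====
-- count = 0; denominator = 1; for num in dict.values(): count += num; denominator *= factorial(num)
-- return factorial(count) // denominator     (math.factorial ported as Nat.factorial on toNat; Pre_ keeps values ≥ 0)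
def calc_permutations (dict : List (String × Int)) : Int :=
  let acc := (PySem.Dict.ofList dict).values.foldl
    (fun (p : Int × Int) num => (p.1 + num, p.2 * (Nat.factorial num.toNat : Int))) (0, 1)
  PySem.Int.floordiv (Nat.factorial acc.1.toNat : Int) acc.2

-- ===== PORT B =====
-- result = 1; n = 0; for c in dict.values(): result *= comb(n + c, c); n += c; return result
-- (math.comb ported as Nat.choose on toNat; Pre_ keeps values ≥ 0)
def calc_permutations_alt (dict : List (String × Int)) : Int :=
  ((PySem.Dict.ofList dict).values.foldl
    (fun (p : Int × Int) c => (p.1 * (Nat.choose (p.2 + c).toNat c.toNat : Int), p.2 + c)) (1, 0)).1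

-- ===== PRECONDITION & SPEC =====
-- Pre_ excludes dicts with a (surviving) negative value: there math.factorial (A) and math.comb (B) raise ValueError.
def Pre_calc_permutations (dict : List (String × Int)) : Prop :=
  ∀ v ∈ (PySem.Dict.ofList dict).values, 0 ≤ v
instance (dict : List (String × Int)) : Decidable (Pre_calc_permutations dict) := by unfold Pre_calc_permutations; infer_instance
def pvWitness_calc_permutations : (List (String × Int)) := [("a", 2), ("b", 1)]

def Spec_calc_permutations (dict : List (String × Int)) (out : Int) : Prop := out = calc_permutations_alt dict
instance (dict : List (String × Int)) (out : Int) : Decidable (Spec_calc_permutations dict out) := by unfold Spec_calc_permutations; infer_instance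

-- ===== CLAIM (what is proved, stated in full; the proofs are below) =====
def Claim_equal_calc_permutations : Prop := ∀ (dict : List (String × Int)), Dom_calc_permutations dict → Pre_calc_permutations dict → Spec_calc_permutations dict (calc_permutations dict)

-- ===== LEMMAS AND PROOFS =====

-- product of the factorials of the (nonnegative) values, as an Int
def pvProdFact (vs : List Int) : Int := (vs.map (fun v => (Nat.factorial v.toNat : Int))).prod

lemma pvProdFact_pos (vs : List Int) : 0 < pvProdFact vs := by
  induction vs with
  | nil => simp [pvProdFact]
  | cons c vs ih =>
      simp only [pvProdFact, List.map_cons, List.prod_cons]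
      exact mul_pos (by exact_mod_cast Nat.factorial_pos c.toNat) ih

-- A's loop computes (sum, product of factorials)
lemma pvFoldA (vs : List Int) (a b : Int) :
    vs.foldl (fun (p : Int × Int) num => (p.1 + num, p.2 * (Nat.factorial num.toNat : Int))) (a, b)
      = (a + vs.sum, b * pvProdFact vs) := by
  induction vs generalizing a b with
  | nil => simp [pvProdFact]
  | cons c vs ih =>
      simp only [List.foldl_cons, ih, List.sum_cons, pvProdFact, List.map_cons, List.prod_cons]
      rw [Prod.mk.injEq]
      exact ⟨by ring, by ring⟩

-- B's loop invariant: result * remaining factorials * factorial(n) = factorial(final sum)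
lemma pvFoldB (vs : List Int) (hvs : ∀ v ∈ vs, 0 ≤ v) (r n : Int) (hn : 0 ≤ n) :
    (vs.foldl (fun (p : Int × Int) c =>
        (p.1 * (Nat.choose (p.2 + c).toNat c.toNat : Int), p.2 + c)) (r, n)).1
      * pvProdFact vs * (Nat.factorial n.toNat : Int)
      = r * (Nat.factorial (n + vs.sum).toNat : Int) := by
  induction vs generalizing r n with
  | nil => simp [pvProdFact]
  | cons c vs ih =>
      have hc : 0 ≤ c := hvs c (by simp)
      have hvs' : ∀ v ∈ vs, 0 ≤ v := fun v hv => hvs v (by simp [hv])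
      have hnc : 0 ≤ n + c := by omega
      have ihc := ih hvs' (r * (Nat.choose (n + c).toNat c.toNat : Int)) (n + c) hnc
      simp only [List.foldl_cons, List.sum_cons, pvProdFact, List.map_cons, List.prod_cons]
      have hfpos : (0 : Int) < (Nat.factorial (n + c).toNat : Int) := by
        exact_mod_cast Nat.factorial_pos (n + c).toNat
      apply mul_right_cancel₀ (ne_of_gt hfpos)
      have hch : (Nat.choose (n + c).toNat c.toNat) * Nat.factorial c.toNat * Nat.factorial n.toNat
          = Nat.factorial (n + c).toNat := by
        have hle : c.toNat ≤ (n + c).toNat := by omega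
        have := Nat.choose_mul_factorial_mul_factorial hle
        have hsub : (n + c).toNat - c.toNat = n.toNat := by omega
        rw [hsub] at this
        exact this
      have hsum : n + (c + vs.sum) = (n + c) + vs.sum := by ring
      calc (vs.foldl (fun (p : Int × Int) c =>
              (p.1 * (Nat.choose (p.2 + c).toNat c.toNat : Int), p.2 + c))
              (r * (Nat.choose (n + c).toNat c.toNat : Int), n + c)).1
            * ((Nat.factorial c.toNat : Int) * pvProdFact vs) * (Nat.factorial n.toNat : Int)
            * (Nat.factorial (n + c).toNat : Int)
          = ((vs.foldl (fun (p : Int × Int) c =>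
              (p.1 * (Nat.choose (p.2 + c).toNat c.toNat : Int), p.2 + c))
              (r * (Nat.choose (n + c).toNat c.toNat : Int), n + c)).1
            * pvProdFact vs * (Nat.factorial (n + c).toNat : Int))
            * ((Nat.factorial c.toNat : Int) * (Nat.factorial n.toNat : Int)) := by ring
        _ = (r * (Nat.choose (n + c).toNat c.toNat : Int) * (Nat.factorial ((n + c) + vs.sum).toNat : Int))
            * ((Nat.factorial c.toNat : Int) * (Nat.factorial n.toNat : Int)) := by rw [ihc]
        _ = r * (Nat.factorial (n + (c + vs.sum)).toNat : Int)
            * (((Nat.choose (n + c).toNat c.toNat : Int) * (Nat.factorial c.toNat : Int)) * (Nat.factorial n.toNat : Int)) := by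
              rw [hsum]; ring
        _ = r * (Nat.factorial (n + (c + vs.sum)).toNat : Int) * (Nat.factorial (n + c).toNat : Int) := by
              rw [← hch]; push_cast; ring

-- ===== VERDICT (by name: the statement is the Claim_ definition above) =====
theorem calc_permutations_spec : Claim_equal_calc_permutations := by
  intro dict _ hpre
  unfold Spec_calc_permutations calc_permutations calc_permutations_alt
  simp only []
  set vs := (PySem.Dict.ofList dict).values with hvs
  have hB := pvFoldB vs hpre 1 0 le_rfl
  simp only [Int.toNat_zero, Nat.factorial_zero, Nat.cast_one, mul_one, one_mul, zero_add] at hB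
  rw [pvFoldA]
  simp only [zero_add, one_mul]
  have hP := pvProdFact_pos vs
  rw [PySem.Int.floordiv_eq_ediv_of_pos hP, ← hB, Int.mul_ediv_cancel _ (ne_of_gt hP)]
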